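-- pv_equiv track=rewrite | github.com/comherron/CourseraDiscreteMath | Diagonals/backTrackingDiagonals.py | getZeros
-- ===== SOURCE A (Python) =====
-- def getZeros(grid):
--     ''' Input:
--     grid: a int[][] that represents the grid we are working on
--     Output:
--     an integer representing the number of zeros present in the grid
--     Extra:
--     terminates the moment it hits a -1 to save on run time (hopefully)'''
--     total =0
--     for i in grid:
--         for j in i:
--             if j ==0:
--                 total =total +1
--             if j == -1:
--                 return total
--     return total
-- ===== SOURCE B (Python) =====
-- def getZeros(grid):
--     flat = [j for row in grid for j in row]
--     try:
--         idx = flat.index(-1)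
--     except ValueError:
--         return flat.count(0)
--     return flat[:idx].count(0)
-- ===== Notes on version B (the rewrite author's own statement) =====
-- stated objective: simpler
-- what changed: Replaces A's fused nested scan with mid-loop early return by a flatten-then-two-pass structure: locate the first -1 with list.index and count zeros in the prefix before it (or the whole flattened list if no -1).
import Mathlib
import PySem

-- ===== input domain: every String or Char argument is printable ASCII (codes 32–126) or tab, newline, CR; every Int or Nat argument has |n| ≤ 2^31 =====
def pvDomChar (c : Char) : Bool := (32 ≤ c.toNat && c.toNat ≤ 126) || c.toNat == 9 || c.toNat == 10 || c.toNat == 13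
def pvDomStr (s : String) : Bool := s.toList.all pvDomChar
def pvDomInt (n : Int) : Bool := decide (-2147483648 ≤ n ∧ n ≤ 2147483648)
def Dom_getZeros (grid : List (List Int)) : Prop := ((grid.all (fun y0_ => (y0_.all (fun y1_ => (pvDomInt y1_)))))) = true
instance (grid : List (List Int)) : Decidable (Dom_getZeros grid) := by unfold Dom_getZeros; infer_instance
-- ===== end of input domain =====

-- B replaces A's fused nested scan (early return inside the loop) by a flatten-then-two-pass
-- decomposition: find the first -1, then count zeros in the prefix before it; objective: simpler.


-- ===== PORT A =====
-- inner loop over one row: .inl t = 'return t' fired (hit a -1), .inr t = row finished with total t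
def getZerosRow (total : Int) : List Int → Sum Int Int
  | [] => .inr total
  | j :: rest =>
    let total' := if j == 0 then total + 1 else total
    if j == -1 then .inl total' else getZerosRow total' rest

-- outer loop over the rows
def getZerosRows (total : Int) : List (List Int) → Int
  | [] => total
  | row :: rest =>
    match getZerosRow total row with
    | .inl t => t
    | .inr t => getZerosRows t rest

def getZeros (grid : List (List Int)) : Int := getZerosRows 0 grid

-- ===== PORT B =====
def getZeros_alt (grid : List (List Int)) : Int :=
  let flat := grid.flatMap (fun row => row)
  match PySem.List.index? flat (-1) with
  | some idx => ((PySem.List.slice flat none (some (idx : Int))).count 0 : Int)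
  | none => (flat.count 0 : Int)

-- ===== PRECONDITION & SPEC =====
def Spec_getZeros (grid : List (List Int)) (out : Int) : Prop := out = getZeros_alt grid
instance (grid : List (List Int)) (out : Int) : Decidable (Spec_getZeros grid out) := by unfold Spec_getZeros; infer_instance

-- ===== CLAIM (what is proved, stated in full; the proofs are below) =====
def Claim_equal_getZeros : Prop := ∀ (grid : List (List Int)), Dom_getZeros grid → Spec_getZeros grid (getZeros grid)

-- ===== LEMMAS AND PROOFS =====

-- single-list version of A's fused scan
def scan1 (t : Int) : List Int → Int
  | [] => t
  | j :: rest =>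
    let t' := if j == 0 then t + 1 else t
    if j == -1 then t' else scan1 t' rest

theorem scan1_append (row : List Int) (t : Int) (rest : List Int) :
    scan1 t (row ++ rest) =
      match getZerosRow t row with
      | .inl v => v
      | .inr v => scan1 v rest := by
  induction row generalizing t with
  | nil => simp [getZerosRow]
  | cons j js ih =>
    simp only [List.cons_append, scan1, getZerosRow]
    by_cases h : j == -1
    · simp [h]
    · simp [h, ih]

theorem getZeros_eq_scan1 (grid : List (List Int)) (t : Int) :
    getZerosRows t grid = scan1 t (grid.flatMap (fun row => row)) := by
  induction grid generalizing t with
  | nil => simp [getZerosRows, scan1]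
  | cons row rest ih =>
    simp only [List.flatMap_cons, getZerosRows, scan1_append]
    cases h : getZerosRow t row with
    | inl v => rfl
    | inr v => simp [ih]

theorem scan1_char (flat : List Int) (t : Int) :
    scan1 t flat = t +
      (match PySem.List.index? flat (-1) with
       | some i => ((flat.take i).count 0 : Int)
       | none => (flat.count 0 : Int)) := by
  induction flat generalizing t with
  | nil => simp [scan1, PySem.List.index?]
  | cons j rest ih =>
    by_cases h : j = -1
    · subst h
      rw [PySem.List.index?_cons_self]
      simp [scan1]
    · have hne : (j == -1) = false := by simp [h]
      rw [PySem.List.index?_cons_of_ne rest h]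
      simp only [scan1, hne]
      rw [ih]
      cases hidx : PySem.List.index? rest (-1) with
      | some i =>
        simp only [Option.map_some]
        by_cases hz : j = 0
        · subst hz; simp; ring
        · simp [hz]
      | none =>
        simp only [Option.map_none]
        by_cases hz : j = 0
        · subst hz; simp; ring
        · simp [hz]

-- ===== VERDICT (by name: the statement is the Claim_ definition above) =====
theorem getZeros_spec : Claim_equal_getZeros := by
  intro grid _
  unfold Spec_getZeros getZeros getZeros_alt
  rw [getZeros_eq_scan1, scan1_char]
  cases h : PySem.List.index? (grid.flatMap (fun row => row)) (-1) with
  | some i =>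
    simp only [h, PySem.List.slice_to_natCast]
    omega
  | none =>
    rw [PySem.List.index?_eq_idxOf?] at h
    have h2 : List.idxOf? (-1) grid.flatten = none := by simpa using h
    simp [h2]
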